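-- pv_equiv track=rewrite | github.com/yasufumi-nakata/Pytra | src/toolchain2/emit/ts/emitter.py | _types_may_mismatch
-- ===== SOURCE A (Python) =====
-- def _types_may_mismatch(left_rt: str, right_rt: str) -> bool:
--     """Return True if left/right types could cause TS2367 (e.g., string vs number)."""
--     _STR: set[str] = set()
--     _STR.add("str")
--     _STR.add("string")
--     _STR.add("char")
--     _NUM: set[str] = set()
--     for _num_name in [
--         "int", "int8", "int16", "int32", "int64", "uint8", "uint16", "uint32", "uint64",
--         "number", "float", "float32", "float64", "byte",
--     ]:
--         _NUM.add(_num_name)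
--     return (left_rt in _STR and right_rt in _NUM) or (left_rt in _NUM and right_rt in _STR)
-- ===== SOURCE B (Python) =====
-- def _is_str_name(name: str) -> bool:
--     return name in ("str", "string", "char")
--
--
-- def _is_num_name(name: str) -> bool:
--     # Parse numeric type names structurally: a base ('int'/'uint'/'float') plus an
--     # optional bit-width suffix, instead of enumerating every width variant.
--     stem = name.rstrip("0123456789")
--     width = name[len(stem):]
--     if stem == "int":
--         return width in ("", "8", "16", "32", "64")
--     if stem == "uint":
--         return width in ("8", "16", "32", "64")
--     if stem == "float":
--         return width in ("", "32", "64")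
--     return name in ("number", "byte")
--
--
-- def _types_may_mismatch(left_rt: str, right_rt: str) -> bool:
--     """Mismatch iff the two names fall on different sides of BOTH category tests."""
--     return (_is_str_name(left_rt) != _is_str_name(right_rt)) and (
--         _is_num_name(left_rt) != _is_num_name(right_rt)
--     )
-- ===== Notes on version B (the rewrite author's own statement) =====
-- stated objective: alternative
-- what changed: B replaces A's two enumerated sets and symmetric cross-membership test with a structural parser for numeric names (strip the trailing bit-width digits, check the stem against int/uint/float and the width against the allowed ones) and combines the two per-argument category flags with a double XOR instead of the (str&num)|(num&str) disjunction.
import Mathlib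
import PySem

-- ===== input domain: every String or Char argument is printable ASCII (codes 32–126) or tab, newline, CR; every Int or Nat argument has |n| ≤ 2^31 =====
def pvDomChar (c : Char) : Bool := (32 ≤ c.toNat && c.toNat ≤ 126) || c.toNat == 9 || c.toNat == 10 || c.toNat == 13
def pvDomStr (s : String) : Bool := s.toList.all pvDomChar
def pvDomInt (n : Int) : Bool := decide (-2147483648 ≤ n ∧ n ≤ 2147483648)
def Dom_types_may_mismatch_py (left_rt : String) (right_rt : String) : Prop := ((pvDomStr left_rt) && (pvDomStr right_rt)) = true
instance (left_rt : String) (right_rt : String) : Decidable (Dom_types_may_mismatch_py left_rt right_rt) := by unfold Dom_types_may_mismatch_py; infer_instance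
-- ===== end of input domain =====

-- B parses numeric names structurally (stem + bit-width suffix) instead of enumerating
-- two sets, and combines the category flags with a double XOR (objective: alternative).

-- ===== PORT A =====
-- _STR built by three .add calls on an empty set
def pvStrSet : PySem.Set String :=
  PySem.Set.add (PySem.Set.add (PySem.Set.add PySem.Set.empty "str") "string") "char"

-- _NUM built by the for-loop of .add calls over the literal list
def pvNumSet : PySem.Set String :=
  ["int", "int8", "int16", "int32", "int64", "uint8", "uint16", "uint32", "uint64",
   "number", "float", "float32", "float64", "byte"].foldl PySem.Set.add PySem.Set.empty

def types_may_mismatch_py (left_rt : String) (right_rt : String) : Bool :=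
  (PySem.Set.contains pvStrSet left_rt && PySem.Set.contains pvNumSet right_rt) ||
  (PySem.Set.contains pvNumSet left_rt && PySem.Set.contains pvStrSet right_rt)

-- ===== PORT B =====
-- name in ("str", "string", "char")
def pvIsStrName (name : String) : Bool :=
  ["str", "string", "char"].contains name

-- name.rstrip("0123456789"): drop the trailing chars of the given set; ported by hand
-- (PySem has no rstrip-with-chars-argument); exact: reverse, drop while in the set, reverse.
def pvRstripDigits (cs : List Char) : List Char :=
  (cs.reverse.dropWhile (fun c => ("0123456789".toList).contains c)).reverse

-- _is_num_name of Source B, working on the code-point list (string == is list ==)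
def pvIsNumName (name : String) : Bool :=
  let cs := name.toList
  let stem := pvRstripDigits cs
  let width := cs.drop stem.length       -- name[len(stem):]
  if stem == "int".toList then
    [[], "8".toList, "16".toList, "32".toList, "64".toList].contains width
  else if stem == "uint".toList then
    ["8".toList, "16".toList, "32".toList, "64".toList].contains width
  else if stem == "float".toList then
    [[], "32".toList, "64".toList].contains width
  else
    cs == "number".toList || cs == "byte".toList

def types_may_mismatch_py_alt (left_rt : String) (right_rt : String) : Bool :=
  (pvIsStrName left_rt != pvIsStrName right_rt) &&
  (pvIsNumName left_rt != pvIsNumName right_rt)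

-- ===== PRECONDITION & SPEC =====
def Spec_types_may_mismatch_py (left_rt : String) (right_rt : String) (out : Bool) : Prop := out = types_may_mismatch_py_alt left_rt right_rt
instance (left_rt : String) (right_rt : String) (out : Bool) : Decidable (Spec_types_may_mismatch_py left_rt right_rt out) := by unfold Spec_types_may_mismatch_py; infer_instance

-- ===== CLAIM (what is proved, stated in full; the proofs are below) =====
def Claim_equal_types_may_mismatch_py : Prop := ∀ (left_rt : String) (right_rt : String), Dom_types_may_mismatch_py left_rt right_rt → Spec_types_may_mismatch_py left_rt right_rt (types_may_mismatch_py left_rt right_rt)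

-- ===== LEMMAS AND PROOFS =====

-- A's _STR membership and B's pvIsStrName agree on every string.
lemma pvStrAgree (s : String) : PySem.Set.contains pvStrSet s = pvIsStrName s := by
  by_cases h1 : s = "str"; · subst h1; rfl
  by_cases h2 : s = "string"; · subst h2; rfl
  by_cases h3 : s = "char"; · subst h3; rfl
  rw [show pvStrSet = ["str", "string", "char"] from rfl]
  simp [PySem.Set.contains, pvIsStrName, h1, h2, h3]

lemma pvSplitAux (l S T : List Char) (h : S ++ T = l) : S ++ l.drop S.length = l := by
  subst h; rw [List.drop_left]

-- the stem and width of Source B's parse recombine to the whole name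
lemma pvSplitName (cs : List Char) :
    pvRstripDigits cs ++ cs.drop (pvRstripDigits cs).length = cs :=
  pvSplitAux cs _ _ (by
    unfold pvRstripDigits
    rw [← List.reverse_append, List.takeWhile_append_dropWhile, List.reverse_reverse])

-- A's _NUM membership and B's structural parse agree on every string.
set_option maxHeartbeats 1000000 in
lemma pvNumAgree (s : String) : PySem.Set.contains pvNumSet s = pvIsNumName s := by
  by_cases h4 : s = "int"; · subst h4; rfl
  by_cases h5 : s = "int8"; · subst h5; rfl
  by_cases h6 : s = "int16"; · subst h6; rfl
  by_cases h7 : s = "int32"; · subst h7; rfl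
  by_cases h8 : s = "int64"; · subst h8; rfl
  by_cases h9 : s = "uint8"; · subst h9; rfl
  by_cases h10 : s = "uint16"; · subst h10; rfl
  by_cases h11 : s = "uint32"; · subst h11; rfl
  by_cases h12 : s = "uint64"; · subst h12; rfl
  by_cases h13 : s = "number"; · subst h13; rfl
  by_cases h14 : s = "float"; · subst h14; rfl
  by_cases h15 : s = "float32"; · subst h15; rfl
  by_cases h16 : s = "float64"; · subst h16; rfl
  by_cases h17 : s = "byte"; · subst h17; rfl
  have hA : PySem.Set.contains pvNumSet s = false := by
    rw [show pvNumSet = ["int", "int8", "int16", "int32", "int64", "uint8", "uint16",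
      "uint32", "uint64", "number", "float", "float32", "float64", "byte"] from rfl]
    simp [PySem.Set.contains, h4, h5, h6, h7, h8, h9, h10, h11, h12, h13, h14, h15, h16, h17]
  rw [hA]
  -- B side: if the parse accepted s, then s = stem ++ width is one of the 14 literals
  by_contra hne
  have hB : pvIsNumName s = true := by
    cases hb : pvIsNumName s
    · exact absurd (hb ▸ rfl) hne
    · rfl
  have hsplit := pvSplitName s.toList
  unfold pvIsNumName at hB
  simp only [] at hB
  split_ifs at hB with hi hu hf
  · -- stem = "int"
    have hstem : pvRstripDigits s.toList = "int".toList := by simpa using hi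
    rw [hstem] at hsplit
    simp only [List.contains_eq_mem, List.mem_cons, List.not_mem_nil, or_false,
      decide_eq_true_eq] at hB
    rcases hB with hw | hw | hw | hw | hw <;> rw [hstem] at hw <;> rw [hw] at hsplit <;>
      first
        | exact h4 (String.toList_inj.mp (by rw [← hsplit]; rfl))
        | exact h5 (String.toList_inj.mp (by rw [← hsplit]; rfl))
        | exact h6 (String.toList_inj.mp (by rw [← hsplit]; rfl))
        | exact h7 (String.toList_inj.mp (by rw [← hsplit]; rfl))
        | exact h8 (String.toList_inj.mp (by rw [← hsplit]; rfl))
  · -- stem = "uint"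
    have hstem : pvRstripDigits s.toList = "uint".toList := by simpa using hu
    rw [hstem] at hsplit
    simp only [List.contains_eq_mem, List.mem_cons, List.not_mem_nil, or_false,
      decide_eq_true_eq] at hB
    rcases hB with hw | hw | hw | hw <;> rw [hstem] at hw <;> rw [hw] at hsplit <;>
      first
        | exact h9 (String.toList_inj.mp (by rw [← hsplit]; rfl))
        | exact h10 (String.toList_inj.mp (by rw [← hsplit]; rfl))
        | exact h11 (String.toList_inj.mp (by rw [← hsplit]; rfl))
        | exact h12 (String.toList_inj.mp (by rw [← hsplit]; rfl))
  · -- stem = "float"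
    have hstem : pvRstripDigits s.toList = "float".toList := by simpa using hf
    rw [hstem] at hsplit
    simp only [List.contains_eq_mem, List.mem_cons, List.not_mem_nil, or_false,
      decide_eq_true_eq] at hB
    rcases hB with hw | hw | hw <;> rw [hstem] at hw <;> rw [hw] at hsplit <;>
      first
        | exact h14 (String.toList_inj.mp (by rw [← hsplit]; rfl))
        | exact h15 (String.toList_inj.mp (by rw [← hsplit]; rfl))
        | exact h16 (String.toList_inj.mp (by rw [← hsplit]; rfl))
  · -- fallback: name in ("number", "byte")
    simp only [Bool.or_eq_true, beq_iff_eq] at hB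
    rcases hB with hw | hw
    · exact h13 (String.toList_inj.mp (by rw [hw]))
    · exact h17 (String.toList_inj.mp (by rw [hw]))

-- no name is both a string name and a number name (needed for the boolean equivalence)
lemma pvDisjoint (s : String) : ¬ (pvIsStrName s = true ∧ pvIsNumName s = true) := by
  rintro ⟨hstr, hnum⟩
  unfold pvIsStrName at hstr
  simp only [List.contains_eq_mem, List.mem_cons, List.not_mem_nil, or_false,
    decide_eq_true_eq] at hstr
  rcases hstr with h | h | h <;> subst h <;> simp [pvIsNumName, pvRstripDigits] at hnum

-- ===== VERDICT (by name: the statement is the Claim_ definition above) =====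
theorem types_may_mismatch_py_spec : Claim_equal_types_may_mismatch_py := by
  intro l r _
  unfold Spec_types_may_mismatch_py types_may_mismatch_py types_may_mismatch_py_alt
  rw [pvStrAgree l, pvStrAgree r, pvNumAgree l, pvNumAgree r]
  have hl := pvDisjoint l
  have hr := pvDisjoint r
  cases hsl : pvIsStrName l <;> cases hnl : pvIsNumName l <;>
    cases hsr : pvIsStrName r <;> cases hnr : pvIsNumName r <;>
    simp_all
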